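-- pv_equiv track=rewrite | github.com/onehoon/OptiScalerInstaller | installer/config/xml_utils.py | _find_tag_end
-- ===== SOURCE A (Python) =====
-- def _find_tag_end(text: str, start_index: int) -> int:
--     quote = None
--     for index in range(start_index + 1, len(text)):
--         char = text[index]
--         if quote:
--             if char == quote:
--                 quote = None
--             continue
--         if char in {'"', "'"}:
--             quote = char
--             continue
--         if char == ">":
--             return index + 1
--     raise ValueError("Unterminated XML tag")
-- ===== SOURCE B (Python) =====
-- def _find_tag_end(text: str, start_index: int) -> int:
--     # Skip quoted attribute values wholesale with str.find instead of a
--     # per-character quote state machine.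
--     i = start_index + 1
--     n = len(text)
--     while i < n:
--         char = text[i]
--         if char == ">":
--             return i + 1
--         if char == '"' or char == "'":
--             i = text.find(char, i + 1)
--             if i == -1:
--                 raise ValueError("Unterminated XML tag")
--         i += 1
--     raise ValueError("Unterminated XML tag")
-- ===== Notes on version B (the rewrite author's own statement) =====
-- stated objective: alternative
-- what changed: B replaces A's per-character quote-state machine with a loop that, on meeting a quote character, skips the whole quoted span in one str.find call, so no quote state variable is maintained.
-- outside the precondition, e.g. on _find_tag_end('"a" >x', -7): A returns -1, B returns 5; on _find_tag_end('<a b=c', 0): A raises ValueError, B raises ValueError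
import Mathlib
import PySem

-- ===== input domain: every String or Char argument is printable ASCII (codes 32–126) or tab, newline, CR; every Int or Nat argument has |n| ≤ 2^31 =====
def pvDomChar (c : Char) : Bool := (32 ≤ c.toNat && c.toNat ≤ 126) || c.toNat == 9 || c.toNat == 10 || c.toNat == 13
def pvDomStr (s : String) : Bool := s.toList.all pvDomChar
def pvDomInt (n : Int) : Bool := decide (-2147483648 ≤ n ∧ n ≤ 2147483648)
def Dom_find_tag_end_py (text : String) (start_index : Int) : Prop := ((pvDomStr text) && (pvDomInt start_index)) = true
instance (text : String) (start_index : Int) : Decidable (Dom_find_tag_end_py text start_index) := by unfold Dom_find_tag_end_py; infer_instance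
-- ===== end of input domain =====

-- B replaces A's per-character quote-state machine with a loop that skips each quoted
-- span wholesale via str.find (objective: alternative structure, same cost).

-- ===== PORT A =====
-- the 'for index in range(...)' loop with early return; quote : Option Char is A's quote variable
def find_tag_end_py_loop (text : List Char) (quote : Option Char) : List Int → Option Int
  | [] => none
  | index :: rest =>
    match PySem.List.pyGet? text index with
    | none => none  -- IndexError
    | some char =>
      match quote with
      | some q => if char = q then find_tag_end_py_loop text none rest
                  else find_tag_end_py_loop text (some q) rest
      | none =>
        if char = '"' ∨ char = '\'' then find_tag_end_py_loop text (some char) rest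
        else if char = '>' then some (index + 1)
        else find_tag_end_py_loop text none rest

def find_tag_end_py (text : String) (start_index : Int) : Int :=
  (find_tag_end_py_loop text.toList none
      (PySem.List.pyRange (start_index + 1) (text.toList.length : Int) 1)).getD 0

-- ===== PORT B =====
-- the 'while i < n' loop; fuel only makes the recursion total (i strictly increases)
def find_tag_end_py_alt_go (text : List Char) (n : Int) : Nat → Int → Option Int
  | 0, _ => none  -- fuel exhausted (never reached: i grows by at least 1 per step)
  | fuel + 1, i =>
    if i < n then
      match PySem.List.pyGet? text i with
      | none => none  -- IndexError
      | some char =>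
        if char = '>' then some (i + 1)
        else if char = '"' ∨ char = '\'' then
          let j := PySem.Chars.findFrom text [char] (i + 1)
          if j = -1 then none  -- raise ValueError
          else find_tag_end_py_alt_go text n fuel (j + 1)
        else find_tag_end_py_alt_go text n fuel (i + 1)
    else none  -- loop ends: raise ValueError

def find_tag_end_py_alt (text : String) (start_index : Int) : Int :=
  (find_tag_end_py_alt_go text.toList (text.toList.length : Int)
      (((text.toList.length : Int) - (start_index + 1)).toNat + 1) (start_index + 1)).getD 0

-- ===== PRECONDITION & SPEC =====
-- grammar check: the suffix is (plain char | quoted span)* followed by an unquoted '>'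
-- (the Nat argument is a structural bound; the list shrinks at every step, so the
-- list's own length is always enough — this is a grammar membership test, not a port)
def pvTagTerminatedGo : Nat → List Char → Bool
  | 0, _ => false
  | _ + 1, [] => false
  | b + 1, c :: rest =>
    if c = '>' then true
    else if c = '"' ∨ c = '\'' then pvTagTerminatedGo b ((rest.dropWhile (· ≠ c)).tail)
    else pvTagTerminatedGo b rest

def pvTagTerminated (l : List Char) : Bool := pvTagTerminatedGo l.length l

-- Pre_ excludes (a) inputs where A raises (no unquoted '>' after start_index: ValueError;
-- or an index error reached from a very negative start_index) and (b) start_index < -1,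
-- where the scan starts at a negative index and A's value rests on Python's accidental
-- negative-index wraparound re-reading the tail of the string.
def Pre_find_tag_end_py (text : String) (start_index : Int) : Prop :=
  -1 ≤ start_index ∧ pvTagTerminated (text.toList.drop (start_index + 1).toNat) = true
instance (text : String) (start_index : Int) : Decidable (Pre_find_tag_end_py text start_index) := by
  unfold Pre_find_tag_end_py; infer_instance

def pvWitness_find_tag_end_py : String × Int := ("a href=\"x>y\">z", 0)

def Spec_find_tag_end_py (text : String) (start_index : Int) (out : Int) : Prop := out = find_tag_end_py_alt text start_index
instance (text : String) (start_index : Int) (out : Int) : Decidable (Spec_find_tag_end_py text start_index out) := by unfold Spec_find_tag_end_py; infer_instance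

-- ===== CLAIM (what is proved, stated in full; the proofs are below) =====
def Claim_equal_find_tag_end_py : Prop := ∀ (text : String) (start_index : Int), Dom_find_tag_end_py text start_index → Pre_find_tag_end_py text start_index → Spec_find_tag_end_py text start_index (find_tag_end_py text start_index)

-- ===== LEMMAS AND PROOFS =====

-- canonical form of the scan, by structural recursion on the suffix; k = absolute offset
def pvSpec : List Char → Nat → Option Int
  | [], _ => none
  | c :: rest, k =>
    if c = '>' then some ((k : Int) + 1)
    else if c = '"' ∨ c = '\'' then
      if (rest.dropWhile (· ≠ c)).isEmpty then none
      else pvSpec ((rest.dropWhile (· ≠ c)).tail) (k + (rest.takeWhile (· ≠ c)).length + 2)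
    else pvSpec rest (k + 1)
  termination_by l _ => l.length
  decreasing_by
  · have h1 := List.length_dropWhile_le (fun x => decide (x ≠ c)) rest
    have h2 := @List.length_tail _ (rest.dropWhile (fun x => decide (x ≠ c)))
    simp at *; omega
  · simp

theorem pv_dropWhile_eq_drop {α : Type} (p : α → Bool) (l : List α) :
    l.dropWhile p = l.drop (l.takeWhile p).length := by
  induction l with
  | nil => simp
  | cons x t ih =>
    by_cases h : p x = true
    · simp [h, ih]
    · simp [h]

theorem pv_find_single (t : List Char) (c : Char) (k : Nat) :
    PySem.Chars.find.go [c] t k =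
      if (t.dropWhile (· ≠ c)).isEmpty then -1
      else ((k + (t.takeWhile (· ≠ c)).length : Nat) : Int) := by
  induction t generalizing k with
  | nil => simp [PySem.Chars.find.go]
  | cons x t ih =>
    by_cases h : x = c
    · subst h
      simp [PySem.Chars.find.go, List.isPrefixOf]
    · have hx : ([c].isPrefixOf (x :: t)) = false := by
        simp [List.isPrefixOf]; exact fun he => absurd he.symm h
      rw [PySem.Chars.find.go, hx]
      simp only [Bool.false_eq_true, if_false]
      rw [ih]
      have hne : (decide (x ≠ c)) = true := by simp [h]
      simp only [List.dropWhile_cons, List.takeWhile_cons, hne, if_true]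
      by_cases he : (t.dropWhile (· ≠ c)).isEmpty = true
      · rw [if_pos he, if_pos he]
      · rw [if_neg he, if_neg he, List.length_cons]
        push_cast; ring

theorem pv_findFrom_single (L : List Char) (c : Char) (m : Nat) (hm : m ≤ L.length) :
    PySem.Chars.findFrom L [c] (m : Int) =
      if ((L.drop m).dropWhile (· ≠ c)).isEmpty then -1
      else ((m + ((L.drop m).takeWhile (· ≠ c)).length : Nat) : Int) := by
  rw [PySem.Chars.findFrom_natCast L [c] m hm]
  unfold PySem.Chars.find
  rw [pv_find_single]
  by_cases he : ((L.drop m).dropWhile (· ≠ c)).isEmpty = true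
  · rw [if_pos he, if_pos he, if_pos rfl]
  · rw [if_neg he, if_neg he]
    have hne : ((0 + ((L.drop m).takeWhile (· ≠ c)).length : Nat) : Int) ≠ -1 := by
      intro h; omega
    rw [if_neg hne]
    push_cast; ring

-- A's inner quote-state scanning equals a wholesale skip of the quoted span
theorem pv_A_quote (N : Nat) (L : List Char) (c : Char) (m : Nat) (hN : L.length - m < N) :
    find_tag_end_py_loop L (some c) (PySem.List.pyRange (m : Int) (L.length : Int) 1) =
      (if ((L.drop m).dropWhile (· ≠ c)).isEmpty then none
       else find_tag_end_py_loop L none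
         (PySem.List.pyRange ((m + ((L.drop m).takeWhile (· ≠ c)).length + 1 : Nat) : Int) (L.length : Int) 1)) := by
  induction N generalizing m with
  | zero => omega
  | succ N ih =>
    by_cases hk : m < L.length
    · rw [PySem.List.pyRange_one_cons (by exact_mod_cast hk)]
      have hget : PySem.List.pyGet? L (m : Int) = some L[m] :=
        PySem.List.pyGet?_ofNat L _ hk
      have hdrop : L.drop m = L[m] :: L.drop (m + 1) := List.drop_eq_getElem_cons hk
      simp only [find_tag_end_py_loop, hget]
      by_cases hc : L[m] = c
      · rw [if_pos hc, hdrop, hc]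
        simp only [List.dropWhile_cons, List.takeWhile_cons]
        simp only [ne_eq, not_true_eq_false, decide_false, Bool.false_eq_true, if_false,
          List.isEmpty_cons, List.length_nil]
        norm_num
      · rw [if_neg hc]
        have hcast : ((m : Int) + 1) = ((m + 1 : Nat) : Int) := by push_cast; ring
        rw [hcast, ih (m + 1) (by omega)]
        have hne : (decide (L[m] ≠ c)) = true := by simp [hc]
        rw [hdrop, List.dropWhile_cons, List.takeWhile_cons, if_pos hne, if_pos hne,
          List.length_cons]
        by_cases he : ((L.drop (m + 1)).dropWhile (· ≠ c)).isEmpty = true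
        · rw [if_pos he, if_pos he]
        · rw [if_neg he, if_neg he]
          have harith : (m + (((L.drop (m+1)).takeWhile (· ≠ c)).length + 1) + 1)
               = (m + 1 + ((L.drop (m+1)).takeWhile (· ≠ c)).length + 1) := by omega
          rw [harith]
    · rw [PySem.List.pyRange_one_eq_nil (by exact_mod_cast (by omega : (L.length : Int) ≤ m))]
      have : L.drop m = [] := List.drop_eq_nil_of_le (by omega)
      simp [find_tag_end_py_loop, this]

-- Port A computes pvSpec
theorem pv_A_spec (N : Nat) (L : List Char) (k : Nat) (hN : L.length - k < N) :
    find_tag_end_py_loop L none (PySem.List.pyRange (k : Int) (L.length : Int) 1) =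
      pvSpec (L.drop k) k := by
  induction N generalizing k with
  | zero => omega
  | succ N ih =>
    by_cases hk : k < L.length
    · rw [PySem.List.pyRange_one_cons (by exact_mod_cast hk)]
      have hget : PySem.List.pyGet? L (k : Int) = some L[k] := PySem.List.pyGet?_ofNat L _ hk
      have hdrop : L.drop k = L[k] :: L.drop (k + 1) := List.drop_eq_getElem_cons hk
      simp only [find_tag_end_py_loop, hget, hdrop, pvSpec]
      by_cases hq : L[k] = '"' ∨ L[k] = '\''
      · have hgt : ¬ (L[k] = '>') := by rcases hq with h | h <;> simp [h]
        rw [if_pos hq, if_neg hgt, if_pos hq]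
        have : ((k : Int) + 1) = ((k + 1 : Nat) : Int) := by push_cast; ring
        rw [this, pv_A_quote N L L[k] (k + 1) (by omega)]
        by_cases he : ((L.drop (k + 1)).dropWhile (· ≠ L[k])).isEmpty = true
        · rw [if_pos he, if_pos he]
        · rw [if_neg he, if_neg he]
          set tw := ((L.drop (k + 1)).takeWhile (· ≠ L[k])).length with htw
          have harg : (L.drop (k + 1)).dropWhile (· ≠ L[k]) = L.drop (k + 1 + tw) := by
            rw [pv_dropWhile_eq_drop, List.drop_drop]
          have htail : ((L.drop (k + 1)).dropWhile (· ≠ L[k])).tail = L.drop (k + 1 + tw + 1) := by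
            rw [harg, List.tail_drop]
          rw [ih (k + 1 + tw + 1) (by omega), htail]
          have : k + 1 + tw + 1 = k + tw + 2 := by omega
          rw [this]
      · by_cases hgt : L[k] = '>'
        · rw [if_neg hq, if_pos hgt, if_pos hgt]
        · rw [if_neg hq, if_neg hgt, if_neg hgt, if_neg hq]
          have : ((k : Int) + 1) = ((k + 1 : Nat) : Int) := by push_cast; ring
          rw [this, ih (k + 1) (by omega)]
    · rw [PySem.List.pyRange_one_eq_nil (by exact_mod_cast (by omega : (L.length : Int) ≤ k))]
      have : L.drop k = [] := List.drop_eq_nil_of_le (by omega)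
      simp [find_tag_end_py_loop, this, pvSpec]

-- Port B computes pvSpec
theorem pv_B_spec (fuel : Nat) (L : List Char) (k : Nat) (hf : L.length - k < fuel) :
    find_tag_end_py_alt_go L (L.length : Int) fuel (k : Int) = pvSpec (L.drop k) k := by
  induction fuel generalizing k with
  | zero => omega
  | succ fuel ih =>
    by_cases hk : k < L.length
    · have hget : PySem.List.pyGet? L (k : Int) = some L[k] := PySem.List.pyGet?_ofNat L _ hk
      have hdrop : L.drop k = L[k] :: L.drop (k + 1) := List.drop_eq_getElem_cons hk
      simp only [find_tag_end_py_alt_go, if_pos (by exact_mod_cast hk : (k : Int) < (L.length : Int)),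
        hget, hdrop, pvSpec]
      by_cases hgt : L[k] = '>'
      · rw [if_pos hgt, if_pos hgt]
      · rw [if_neg hgt, if_neg hgt]
        by_cases hq : L[k] = '"' ∨ L[k] = '\''
        · rw [if_pos hq, if_pos hq]
          have hcast : ((k : Int) + 1) = ((k + 1 : Nat) : Int) := by push_cast; ring
          rw [hcast, pv_findFrom_single L L[k] (k + 1) (by omega)]
          by_cases he : ((L.drop (k + 1)).dropWhile (· ≠ L[k])).isEmpty = true
          · rw [if_pos he, if_pos rfl, if_pos he]
          · rw [if_neg he, if_neg he]
            set tw := ((L.drop (k + 1)).takeWhile (· ≠ L[k])).length with htw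
            have hne : ((k + 1 + tw : Nat) : Int) ≠ -1 := by intro h; omega
            rw [if_neg hne]
            have hcast2 : ((k + 1 + tw : Nat) : Int) + 1 = ((k + 1 + tw + 1 : Nat) : Int) := by
              push_cast; ring
            rw [hcast2, ih (k + 1 + tw + 1) (by omega)]
            have htail : ((L.drop (k + 1)).dropWhile (· ≠ L[k])).tail = L.drop (k + 1 + tw + 1) := by
              rw [pv_dropWhile_eq_drop, List.drop_drop, List.tail_drop]
            rw [htail]
            have : k + 1 + tw + 1 = k + tw + 2 := by omega
            rw [this]
        · rw [if_neg hq, if_neg hq]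
          have hcast : ((k : Int) + 1) = ((k + 1 : Nat) : Int) := by push_cast; ring
          rw [hcast, ih (k + 1) (by omega)]
    · have hge : ¬ ((k : Int) < (L.length : Int)) := by exact_mod_cast (by omega : ¬ k < L.length)
      have : L.drop k = [] := List.drop_eq_nil_of_le (by omega)
      simp [find_tag_end_py_alt_go, hge, this, pvSpec]

-- ===== VERDICT (by name: the statement is the Claim_ definition above) =====
theorem find_tag_end_py_spec : Claim_equal_find_tag_end_py := by
  intro text start_index _hDom hPre
  unfold Spec_find_tag_end_py
  obtain ⟨hge, _hterm⟩ := hPre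
  set L := text.toList with hL
  have hnn : 0 ≤ start_index + 1 := by omega
  have hk : start_index + 1 = ((start_index + 1).toNat : Int) := (Int.toNat_of_nonneg hnn).symm
  set k := (start_index + 1).toNat with hkdef
  unfold find_tag_end_py find_tag_end_py_alt
  rw [← hL, hk]
  rw [pv_A_spec (L.length - k + 1) L k (by omega)]
  have hfuel : L.length - k < ((L.length : Int) - ((k : Int))).toNat + 1 := by omega
  rw [pv_B_spec _ L k hfuel]
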